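-- pv_equiv track=rewrite | github.com/alicialira/assignment6 | bitwise_operations.py | bitwise_operations
-- ===== SOURCE A (Python) =====
-- def bitwise_operations(numbers):
--     result = {
--         "AND": numbers[0],
--         "OR": numbers[0],
--         "XOR": numbers[0]
--     }
--     for num in numbers[1:]:
--         result["AND"] &= num
--         result["OR"] |= num
--         result["XOR"] ^= num
--     return result
-- ===== SOURCE B (Python) =====
-- def bitwise_operations(numbers):
--     def dc(seg):
--         # divide and conquer: combine the left and right halves' triples
--         if len(seg) == 1:
--             v = seg[0]
--             return (v, v, v)
--         mid = len(seg) // 2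
--         a1, o1, x1 = dc(seg[:mid])
--         a2, o2, x2 = dc(seg[mid:])
--         return (a1 & a2, o1 | o2, x1 ^ x2)
--
--     a, o, x = dc(numbers)
--     return {"AND": a, "OR": o, "XOR": x}
-- ===== Notes on version B (the rewrite author's own statement) =====
-- stated objective: alternative
-- what changed: A's single left-to-right loop over three simultaneous accumulators is replaced by a divide-and-conquer recursion that splits the list in half and combines the two halves' (AND, OR, XOR) triples; correct because &, | and ^ are associative.
import Mathlib
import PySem

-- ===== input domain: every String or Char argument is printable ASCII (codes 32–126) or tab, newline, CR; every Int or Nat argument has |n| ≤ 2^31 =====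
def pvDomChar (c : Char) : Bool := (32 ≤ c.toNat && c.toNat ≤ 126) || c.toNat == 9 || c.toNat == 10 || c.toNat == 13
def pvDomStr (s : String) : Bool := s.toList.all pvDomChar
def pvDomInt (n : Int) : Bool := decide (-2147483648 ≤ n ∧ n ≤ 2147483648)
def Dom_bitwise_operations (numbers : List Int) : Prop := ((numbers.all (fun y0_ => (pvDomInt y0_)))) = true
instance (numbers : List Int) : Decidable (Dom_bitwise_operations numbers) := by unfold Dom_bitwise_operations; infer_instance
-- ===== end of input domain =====

-- B replaces A's single left-to-right loop over three simultaneous accumulators with a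
-- divide-and-conquer recursion that combines the (AND, OR, XOR) triples of the two halves
-- (alternative decomposition, same cost; correct since &, |, ^ are associative).

-- ===== PORT A =====
-- one loop over numbers[1:], updating the three dict entries in place
def bitwise_operations (numbers : List Int) : List (String × Int) :=
  match numbers with
  | [] => []  -- Python raises IndexError here; excluded by Pre_
  | first :: _ =>
    let st := (PySem.List.slice numbers (some 1) none).foldl
      (fun (r : Int × Int × Int) num => (PySem.Int.band r.1 num, PySem.Int.bor r.2.1 num, PySem.Int.bxor r.2.2 num))
      (first, first, first)
    [("AND", st.1), ("OR", st.2.1), ("XOR", st.2.2)]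

-- ===== PORT B =====
-- dc(seg): singleton is its own triple; otherwise split at len//2 and combine the halves
def pvDcTriple : List Int → Int × Int × Int
  | [] => (0, 0, 0)  -- unreachable: Python B's dc never returns on an empty segment (Pre_ excludes [])
  | [v] => (v, v, v)
  | x :: y :: rest =>
    let l := x :: y :: rest
    let mid := l.length / 2
    let L := pvDcTriple (l.take mid)
    let R := pvDcTriple (l.drop mid)
    (PySem.Int.band L.1 R.1, PySem.Int.bor L.2.1 R.2.1, PySem.Int.bxor L.2.2 R.2.2)
termination_by l => l.length
decreasing_by
  · simp [List.length_take]; omega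
  · simp; omega

def bitwise_operations_alt (numbers : List Int) : List (String × Int) :=
  let t := pvDcTriple numbers
  [("AND", t.1), ("OR", t.2.1), ("XOR", t.2.2)]

-- ===== PRECONDITION & SPEC =====
-- Pre_ excludes the empty list, on which A raises IndexError (numbers[0]); B's dc does not return there either
def Pre_bitwise_operations (numbers : List Int) : Prop := numbers ≠ []
instance (numbers : List Int) : Decidable (Pre_bitwise_operations numbers) := by unfold Pre_bitwise_operations; infer_instance
def pvWitness_bitwise_operations : List Int := ([5, 3, 12])

def Spec_bitwise_operations (numbers : List Int) (out : List (String × Int)) : Prop := out = bitwise_operations_alt numbers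
instance (numbers : List Int) (out : List (String × Int)) : Decidable (Spec_bitwise_operations numbers out) := by unfold Spec_bitwise_operations; infer_instance

-- ===== CLAIM =====
def Claim_equal_bitwise_operations : Prop := ∀ (numbers : List Int), Dom_bitwise_operations numbers → Pre_bitwise_operations numbers → Spec_bitwise_operations numbers (bitwise_operations numbers)

-- ===== LEMMAS AND PROOFS =====

-- bits of m not in n, as a subtraction: the Nat identity behind PySem's negative-operand cases
theorem pv_sub_and_eq_ldiff (m : Nat) : ∀ n, m - (m &&& n) = Nat.ldiff m n := by
  induction m using Nat.binaryRec with
  | zero => intro n; simp [Nat.ldiff]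
  | bit b m ih =>
    intro n
    rw [← Nat.bit_testBit_zero_shiftRight_one n, Nat.land_bit, Nat.ldiff_bit]
    have hle : m &&& (n >>> 1) ≤ m := Nat.and_le_left
    have := ih (n >>> 1)
    cases b <;> cases n.testBit 0 <;> simp [Nat.bit_val] <;> omega

-- integers agreeing on every bit are equal
theorem pv_int_testBit_ext {a b : Int} (h : ∀ k, a.testBit k = b.testBit k) : a = b := by
  cases a with
  | ofNat m =>
    cases b with
    | ofNat n =>
      have : m = n := Nat.eq_of_testBit_eq (fun k => by simpa [Int.testBit] using h k)
      simp [this]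
    | negSucc n =>
      exfalso
      have hk := h (m + n)
      have hm : m < 2 ^ (m + n) := lt_of_lt_of_le Nat.lt_two_pow_self (Nat.pow_le_pow_right (by norm_num) (Nat.le_add_right _ _))
      have hn : n < 2 ^ (m + n) := lt_of_lt_of_le Nat.lt_two_pow_self (Nat.pow_le_pow_right (by norm_num) (Nat.le_add_left _ _))
      simp [Int.testBit, Nat.testBit_lt_two_pow hm, Nat.testBit_lt_two_pow hn] at hk
  | negSucc m =>
    cases b with
    | ofNat n =>
      exfalso
      have hk := h (m + n)
      have hm : m < 2 ^ (m + n) := lt_of_lt_of_le Nat.lt_two_pow_self (Nat.pow_le_pow_right (by norm_num) (Nat.le_add_right _ _))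
      have hn : n < 2 ^ (m + n) := lt_of_lt_of_le Nat.lt_two_pow_self (Nat.pow_le_pow_right (by norm_num) (Nat.le_add_left _ _))
      simp [Int.testBit, Nat.testBit_lt_two_pow hm, Nat.testBit_lt_two_pow hn] at hk
    | negSucc n =>
      have : m = n := Nat.eq_of_testBit_eq (fun k => by simpa [Int.testBit] using h k)
      simp [this]

theorem pv_band_eq_land (a b : Int) : PySem.Int.band a b = Int.land a b := by
  cases a with
  | ofNat m => cases b with
    | ofNat n => simp [PySem.Int.band, Int.land]
    | negSucc n => simp [PySem.Int.band, Int.land, pv_sub_and_eq_ldiff]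
  | negSucc m => cases b with
    | ofNat n => simp [PySem.Int.band, Int.land, pv_sub_and_eq_ldiff]
    | negSucc n => simp [PySem.Int.band, Int.land, Int.negSucc_eq]; omega

theorem pv_bor_eq_lor (a b : Int) : PySem.Int.bor a b = Int.lor a b := by
  cases a with
  | ofNat m => cases b with
    | ofNat n => simp [PySem.Int.bor, Int.lor]
    | negSucc n => simp [PySem.Int.bor, Int.lor, pv_sub_and_eq_ldiff, Int.negSucc_eq]; omega
  | negSucc m => cases b with
    | ofNat n => simp [PySem.Int.bor, Int.lor, pv_sub_and_eq_ldiff, Int.negSucc_eq]; omega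
    | negSucc n => simp [PySem.Int.bor, Int.lor, Int.negSucc_eq]; omega

theorem pv_bxor_eq_lxor (a b : Int) : PySem.Int.bxor a b = Int.xor a b := by
  cases a with
  | ofNat m => cases b with
    | ofNat n => simp [PySem.Int.bxor, Int.xor]
    | negSucc n => simp [PySem.Int.bxor, Int.xor, Int.negSucc_eq]; omega
  | negSucc m => cases b with
    | ofNat n => simp [PySem.Int.bxor, Int.xor, Int.negSucc_eq]; omega
    | negSucc n => simp [PySem.Int.bxor, Int.xor, Int.negSucc_eq]; omega

theorem pv_band_assoc (a b c : Int) : PySem.Int.band (PySem.Int.band a b) c = PySem.Int.band a (PySem.Int.band b c) := by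
  simp only [pv_band_eq_land]
  exact pv_int_testBit_ext (fun k => by simp [Int.testBit_land, Bool.and_assoc])

theorem pv_bor_assoc (a b c : Int) : PySem.Int.bor (PySem.Int.bor a b) c = PySem.Int.bor a (PySem.Int.bor b c) := by
  simp only [pv_bor_eq_lor]
  exact pv_int_testBit_ext (fun k => by simp [Int.testBit_lor, Bool.or_assoc])

theorem pv_bxor_assoc (a b c : Int) : PySem.Int.bxor (PySem.Int.bxor a b) c = PySem.Int.bxor a (PySem.Int.bxor b c) := by
  simp only [pv_bxor_eq_lxor]
  exact pv_int_testBit_ext (fun k => by simp [Int.testBit_lxor])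

-- fold an associative op from a seed through a list, pulling the seed out front
theorem pv_foldl_assoc_pull {op : Int → Int → Int}
    (hop : ∀ a b c, op (op a b) c = op a (op b c)) :
    ∀ (t : List Int) (b h : Int), t.foldl op (op b h) = op b (t.foldl op h) := by
  intro t
  induction t with
  | nil => intro b h; rfl
  | cons x xs ih => intro b h; simp only [List.foldl]; rw [hop, ih]

-- the 1-seeded fold of an associative op over an append of nonempty lists splits
theorem pv_fold1_append {op : Int → Int → Int}
    (hop : ∀ a b c, op (op a b) c = op a (op b c))
    (h1 : Int) (t1 : List Int) (h2 : Int) (t2 : List Int) :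
    ((h1 :: t1) ++ (h2 :: t2)).tail.foldl op ((h1 :: t1) ++ (h2 :: t2)).head! =
      op (t1.foldl op h1) (t2.foldl op h2) := by
  simp only [List.cons_append, List.tail_cons, List.head!]
  rw [List.foldl_append]
  simp only [List.foldl]
  exact pv_foldl_assoc_pull hop t2 _ h2

-- the divide-and-conquer triple equals the three 1-seeded left folds
theorem pv_dc_eq_folds : ∀ (n : Nat) (l : List Int), l.length ≤ n → l ≠ [] →
    pvDcTriple l = (l.tail.foldl PySem.Int.band l.head!,
                    l.tail.foldl PySem.Int.bor l.head!,
                    l.tail.foldl PySem.Int.bxor l.head!) := by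
  intro n
  induction n with
  | zero => intro l hl hne; cases l with
    | nil => exact absurd rfl hne
    | cons a t => simp at hl
  | succ n ih =>
    intro l hl hne
    match l with
    | [] => exact absurd rfl hne
    | [v] => simp [pvDcTriple]
    | x :: y :: rest =>
      rw [pvDcTriple]
      have hlen : (x :: y :: rest).length = rest.length + 2 := by simp
      set L : List Int := x :: y :: rest with hL
      have hmid1 : 1 ≤ L.length / 2 := by simp [hL]; omega
      have hmidlt : L.length / 2 < L.length := by simp [hL]; omega
      have htake : (L.take (L.length / 2)).length = L.length / 2 := by
        simp [List.length_take]; omega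
      have hdrop : (L.drop (L.length / 2)).length = L.length - L.length / 2 := by
        simp [List.length_drop]
      have htne : L.take (L.length / 2) ≠ [] := by
        intro h; rw [h] at htake; simp at htake; omega
      have hdne : L.drop (L.length / 2) ≠ [] := by
        intro h; rw [h] at hdrop; simp at hdrop; omega
      have h1 : (L.take (L.length / 2)).length ≤ n := by rw [htake]; simp [hL] at hl ⊢; omega
      have h2 : (L.drop (L.length / 2)).length ≤ n := by rw [hdrop]; simp [hL] at hl ⊢; omega
      rw [ih _ h1 htne, ih _ h2 hdne]
      obtain ⟨a1, t1, hT⟩ : ∃ a t, L.take (L.length / 2) = a :: t := by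
        cases hT : L.take (L.length / 2) with
        | nil => exact absurd hT htne
        | cons a t => exact ⟨a, t, rfl⟩
      obtain ⟨a2, t2, hD⟩ : ∃ a t, L.drop (L.length / 2) = a :: t := by
        cases hD : L.drop (L.length / 2) with
        | nil => exact absurd hD hdne
        | cons a t => exact ⟨a, t, rfl⟩
      have happ : L = (a1 :: t1) ++ (a2 :: t2) := by
        conv_lhs => rw [← List.take_append_drop (L.length / 2) L]
        rw [hT, hD]
      simp only [hT, hD, List.tail_cons, List.head!]
      have e1 := pv_fold1_append pv_band_assoc a1 t1 a2 t2
      have e2 := pv_fold1_append pv_bor_assoc a1 t1 a2 t2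
      have e3 := pv_fold1_append pv_bxor_assoc a1 t1 a2 t2
      rw [← happ] at e1 e2 e3
      simp only [← e1, ← e2, ← e3]
      rfl

-- A's combined triple fold splits into the three separate folds
theorem pv_triple_fold_split (rest : List Int) (a o x : Int) :
    rest.foldl (fun (r : Int × Int × Int) num => (PySem.Int.band r.1 num, PySem.Int.bor r.2.1 num, PySem.Int.bxor r.2.2 num)) (a, o, x)
      = (rest.foldl PySem.Int.band a, rest.foldl PySem.Int.bor o, rest.foldl PySem.Int.bxor x) := by
  induction rest generalizing a o x with
  | nil => rfl
  | cons h t ih => simp [List.foldl, ih]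

-- ===== VERDICT =====
theorem bitwise_operations_spec : Claim_equal_bitwise_operations := by
  intro numbers _ hpre
  match numbers with
  | [] => exact absurd rfl hpre
  | first :: t =>
    show bitwise_operations (first :: t) = bitwise_operations_alt (first :: t)
    rw [bitwise_operations_alt]
    rw [pv_dc_eq_folds (first :: t).length _ le_rfl (by simp)]
    simp [bitwise_operations, PySem.List.slice_from_one, pv_triple_fold_split]
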